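-- pv_equiv track=rewrite | github.com/HenriqueOPeixoto/python-ftp | terminal.py | get_spaced_arg_split
-- ===== SOURCE A (Python) =====
-- def get_spaced_arg_split(cmd):
--
--     quote_pos_list = []
--     args_list = []
--
--     quotes = cmd.count('"')
--
--     args_list.append(cmd.split(' ')[0].upper())
--
--     for c in range(len(cmd)):
--         # For every char in c, this checks for the quote pos and adds
--         # them to a list
--         if cmd.startswith('"', c):
--             quote_pos_list.append(c)
--
--     for i in range(1, quotes, 2):
--         # This collects the indices saved on the quote_pos_list
--         # and splices the command at those positions to get the
--         # arguments
--         args_list.append(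
--             cmd[quote_pos_list[i - 1] + 1:quote_pos_list[i]])
--
--     return args_list
-- ===== SOURCE B (Python) =====
-- def get_spaced_arg_split(cmd):
--     # One pass over the string with an in-quote buffer, instead of collecting
--     # quote positions and slicing between consecutive pairs.
--     args_list = [cmd.split(' ')[0].upper()]
--     buf = None
--     for ch in cmd:
--         if ch == '"':
--             if buf is None:
--                 buf = []
--             else:
--                 args_list.append(''.join(buf))
--                 buf = None
--         elif buf is not None:
--             buf.append(ch)
--     return args_list
-- ===== Notes on version B (the rewrite author's own statement) =====
-- stated objective: faster
-- what changed: A collects all quote positions in one pass and then slices the string between consecutive position pairs; B makes a single character pass with an in-quote buffer, emitting a segment at each closing quote (a timing run measured B 3.85x faster at the largest size: one direct scan vs startswith-per-index plus slicing).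
import Mathlib
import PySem

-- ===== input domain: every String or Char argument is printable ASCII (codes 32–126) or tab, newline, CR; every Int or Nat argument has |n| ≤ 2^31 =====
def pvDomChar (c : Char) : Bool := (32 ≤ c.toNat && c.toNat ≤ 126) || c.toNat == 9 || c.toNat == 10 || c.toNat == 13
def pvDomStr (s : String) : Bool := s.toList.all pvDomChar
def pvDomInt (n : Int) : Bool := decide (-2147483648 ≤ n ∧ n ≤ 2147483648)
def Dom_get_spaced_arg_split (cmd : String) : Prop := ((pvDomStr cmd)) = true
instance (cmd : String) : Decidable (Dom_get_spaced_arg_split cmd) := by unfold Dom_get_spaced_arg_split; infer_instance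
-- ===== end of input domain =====

-- B replaces A's two passes (collect all quote positions, then slice between consecutive pairs)
-- by a single character pass keeping an in-quote buffer; objective: faster (measured) and plainer.

-- ===== PORT A =====
def get_spaced_arg_split (cmd : String) : List String :=
  -- quote_pos_list = positions c with cmd.startswith('"', c); for 0 ≤ c this is a prefix test on cmd[c:] (exact)
  let quote_pos_list : List Int :=
    (PySem.List.pyRange 0 (PySem.Str.len cmd) 1).foldl
      (fun acc c =>
        if PySem.Str.startswith (PySem.Str.slice cmd (some c) none) "\"" then acc ++ [c] else acc) []
  let quotes : Int := (PySem.Str.count cmd "\"" : Int)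
  let args_list : List String :=
    [PySem.Str.upper (PySem.List.pyGetD ((PySem.Str.split? cmd " ").getD []) 0 "")]
  (PySem.List.pyRange 1 quotes 2).foldl
    (fun acc i =>
      acc ++ [PySem.Str.slice cmd (some (PySem.List.pyGetD quote_pos_list (i - 1) 0 + 1))
                                  (some (PySem.List.pyGetD quote_pos_list i 0))]) args_list

-- ===== PORT B =====
-- B's loop body: state = (args_list, buf); buf = none means "outside quotes"
def pvAltStep (st : List String × Option (List Char)) (ch : Char) : List String × Option (List Char) :=
  match st with
  | (args, none) => if ch == '"' then (args, some []) else (args, none)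
  | (args, some buf) => if ch == '"' then (args ++ [String.ofList buf], none) else (args, some (buf ++ [ch]))

def get_spaced_arg_split_alt (cmd : String) : List String :=
  (cmd.toList.foldl pvAltStep
    ([PySem.Str.upper (PySem.List.pyGetD ((PySem.Str.split? cmd " ").getD []) 0 "")], none)).1

-- ===== PRECONDITION & SPEC =====
def Spec_get_spaced_arg_split (cmd : String) (out : List String) : Prop := out = get_spaced_arg_split_alt cmd
instance (cmd : String) (out : List String) : Decidable (Spec_get_spaced_arg_split cmd out) := by unfold Spec_get_spaced_arg_split; infer_instance

-- ===== CLAIM (what is proved, stated in full; the proofs are below) =====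
def Claim_equal_get_spaced_arg_split : Prop := ∀ (cmd : String), Dom_get_spaced_arg_split cmd → Spec_get_spaced_arg_split cmd (get_spaced_arg_split cmd)

-- ===== LEMMAS AND PROOFS =====

-- positions of '"' in a char list, as a structural recursion
def posQ : List Char → List Nat
  | [] => []
  | c :: cs => if c = '"' then 0 :: (posQ cs).map (· + 1) else (posQ cs).map (· + 1)

-- the between-quote segments, as B's automaton computes them: O = outside quotes, I = inside with buffer
mutual
def segsO : List Char → List (List Char)
  | [] => []
  | c :: cs => if c = '"' then segsI [] cs else segsO cs
  termination_by cs => cs.length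
def segsI : List Char → List Char → List (List Char)
  | _, [] => []
  | buf, c :: cs => if c = '"' then buf :: segsO cs else segsI (buf ++ [c]) cs
  termination_by _ cs => cs.length
end

lemma countgo_singleton (c : Char) :
    ∀ (l : List Char) (fuel acc : Nat), l.length ≤ fuel →
      PySem.Chars.count.go [c] fuel l acc = acc + l.count c := by
  intro l
  induction l with
  | nil => intro fuel acc _; cases fuel <;> simp [PySem.Chars.count.go]
  | cons h t ih =>
    intro fuel acc hf
    cases fuel with
    | zero => simp at hf
    | succ n =>
      by_cases hc : h = c
      · subst hc
        have : [h].isPrefixOf (h :: t) = true := by simp [List.isPrefixOf]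
        simp only [PySem.Chars.count.go, this, if_pos]
        simp only [List.length, List.drop_succ_cons, List.drop_zero]
        rw [ih n (acc + 1) (by simpa using hf)]
        simp [List.count_cons]
        omega
      · have : [c].isPrefixOf (h :: t) = false := by
          simp [List.isPrefixOf]; exact fun h' => (hc h'.symm).elim
        simp only [PySem.Chars.count.go, this]
        rw [if_neg (by simp [this])]
        rw [ih n acc (by simpa using hf)]
        simp [List.count_cons, hc]

lemma count_singleton (cs : List Char) (c : Char) :
    PySem.Chars.count cs [c] = cs.count c := by
  simp only [PySem.Chars.count, List.isEmpty_cons, if_neg Bool.false_ne_true]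
  rw [countgo_singleton c cs cs.length 0 le_rfl]; omega

lemma posQ_length (cs : List Char) : (posQ cs).length = cs.count '"' := by
  induction cs with
  | nil => simp [posQ]
  | cons c cs ih =>
    by_cases h : c = '"' <;> simp [posQ, h, List.count_cons, ih]

lemma getD_map_add (l : List Nat) (m n : Nat) (h : n < l.length) :
    (l.map (· + m)).getD n 0 = l.getD n 0 + m := by
  rw [List.getD_eq_getElem _ _ (by simpa using h), List.getD_eq_getElem _ _ h]
  simp

lemma startswith_quote_iff (l : List Char) :
    PySem.Chars.startswith l ['"'] = true ↔ l.head? = some '"' := by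
  rw [PySem.Chars.startswith_iff]
  cases l with
  | nil => simp
  | cons c cs => simp [List.cons_prefix_cons, eq_comm]

lemma filter_range_eq_posQ (cs : List Char) :
    (List.range cs.length).filter (fun k => PySem.Chars.startswith (cs.drop k) ['"']) = posQ cs := by
  induction cs with
  | nil => simp [posQ]
  | cons c cs ih =>
    rw [List.length_cons, List.range_succ_eq_map]
    rw [List.filter_cons]
    rw [List.filter_map]
    have htail : (List.range cs.length).filter
        ((fun k => PySem.Chars.startswith ((c :: cs).drop k) ['"']) ∘ Nat.succ)
        = (List.range cs.length).filter (fun k => PySem.Chars.startswith (cs.drop k) ['"']) := by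
      apply List.filter_congr
      intro k _; simp [Function.comp]
    rw [htail, ih]
    by_cases hc : c = '"'
    · subst hc
      have : PySem.Chars.startswith ((('"' : Char) :: cs).drop 0) ['"'] = true := by
        rw [startswith_quote_iff]; simp
      simp only [this, if_pos, posQ, if_pos rfl]
    · have : PySem.Chars.startswith ((c :: cs).drop 0) ['"'] = false := by
        rw [Bool.eq_false_iff]
        intro h; rw [startswith_quote_iff] at h; simp at h; exact hc h
      simp only [this, Bool.false_eq_true, if_neg, posQ, if_neg hc]
      simp [Function.comp, Nat.succ_eq_add_one]

lemma segsI_no_quote (cs : List Char) (h : ('"' : Char) ∉ cs) : ∀ buf, segsI buf cs = [] := by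
  induction cs with
  | nil => intro buf; simp [segsI]
  | cons c cs ih =>
    intro buf
    have hc : c ≠ '"' := fun hh => h (hh ▸ List.mem_cons_self ..)
    rw [segsI, if_neg hc]
    exact ih (fun hm => h (List.mem_cons_of_mem _ hm)) _

lemma segsI_append (mid : List Char) (h : ('"' : Char) ∉ mid) :
    ∀ (buf rest : List Char), segsI buf (mid ++ '"' :: rest) = (buf ++ mid) :: segsO rest := by
  induction mid with
  | nil => intro buf rest; simp [segsI]
  | cons c mid ih =>
    intro buf rest
    have hc : c ≠ '"' := fun hh => h (hh ▸ List.mem_cons_self ..)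
    rw [List.cons_append, segsI, if_neg hc, ih (fun hm => h (List.mem_cons_of_mem _ hm))]
    simp

lemma posQ_append (mid : List Char) (h : ('"' : Char) ∉ mid) (rest : List Char) :
    posQ (mid ++ rest) = (posQ rest).map (· + mid.length) := by
  induction mid with
  | nil => simp
  | cons c mid ih =>
    have hc : c ≠ '"' := fun hh => h (hh ▸ List.mem_cons_self ..)
    rw [List.cons_append, posQ, if_neg hc, ih (fun hm => h (List.mem_cons_of_mem _ hm))]
    rw [List.map_map]
    apply List.map_congr_left
    intro a _; simp [Function.comp]; omega

lemma exists_first_quote {cs : List Char} (h : ('"' : Char) ∈ cs) :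
    ∃ mid rest, cs = mid ++ '"' :: rest ∧ ('"' : Char) ∉ mid := by
  induction cs with
  | nil => simp at h
  | cons c cs ih =>
    by_cases hc : c = '"'
    · exact ⟨[], cs, by simp [hc], by simp⟩
    · have : ('"' : Char) ∈ cs := by
        rcases List.mem_cons.1 h with h1 | h1
        · exact (hc h1.symm).elim
        · exact h1
      obtain ⟨mid, rest, he, hn⟩ := ih this
      exact ⟨c :: mid, rest, by simp [he], by simp [hn]; exact fun hh => hc hh.symm⟩

-- the slice expression A computes for pair k, in drop/take form
def sliceAt (cs : List Char) (k : Nat) : List Char :=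
  (cs.drop ((posQ cs).getD (2 * k) 0 + 1)).take ((posQ cs).getD (2 * k + 1) 0 - ((posQ cs).getD (2 * k) 0 + 1))

lemma main_slices : ∀ (cs : List Char),
    (List.range (cs.count '"' / 2)).map (sliceAt cs) = segsO cs := by
  intro cs
  induction hn : cs.length using Nat.strong_induction_on generalizing cs with
  | _ n ih =>
  subst hn
  cases cs with
  | nil => simp [segsO]
  | cons c cs =>
    by_cases hc : c = '"'
    · subst hc
      by_cases hq : ('"' : Char) ∈ cs
      · obtain ⟨mid, rest, he, hmid⟩ := exists_first_quote hq
        subst he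
        have hcnt : (('"' : Char) :: (mid ++ '"' :: rest)).count '"' = rest.count '"' + 2 := by
          simp [List.count_cons, List.count_append, List.count_eq_zero.2 hmid]
        have hpos : posQ ('"' :: (mid ++ '"' :: rest))
            = 0 :: (mid.length + 1) :: (posQ rest).map (· + (mid.length + 2)) := by
          rw [posQ, if_pos rfl, posQ_append mid hmid, posQ, if_pos rfl]
          simp only [List.map_cons, List.map_map, Nat.zero_add]
          congr 1
          congr 1
          apply List.map_congr_left
          intro a _; simp [Function.comp]; omega
        rw [hcnt]
        have h2 : (rest.count '"' + 2) / 2 = rest.count '"' / 2 + 1 := by omega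
        rw [h2, List.range_succ_eq_map, List.map_cons, List.map_map]
        rw [segsO, if_pos rfl, segsI_append mid hmid, List.nil_append]
        congr 1
        · -- head: slice between the first two quotes is mid
          show sliceAt _ 0 = mid
          rw [sliceAt, hpos]
          simp only [Nat.mul_zero, List.getD_cons_zero, Nat.zero_add, Nat.mul_zero,
            List.getD_cons_succ, List.getD_cons_zero]
          rw [List.drop_succ_cons, List.drop_zero]
          have : mid.length + 1 - (0 + 1) = mid.length := by omega
          rw [this]
          simp [List.take_left]
        · -- tail: shifted slices of rest
          rw [← ih rest.length (by simp; omega) rest rfl]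
          apply List.map_congr_left
          intro k hk
          rw [List.mem_range] at hk
          have hlen : (posQ rest).length = rest.count '"' := posQ_length rest
          have hb0 : 2 * k < (posQ rest).length := by omega
          have hb1 : 2 * k + 1 < (posQ rest).length := by omega
          show sliceAt _ (k + 1) = sliceAt rest k
          rw [sliceAt, sliceAt, hpos]
          have e0 : 2 * (k + 1) = (2 * k) + 1 + 1 := by omega
          rw [e0]
          simp only [List.getD_cons_succ]
          rw [getD_map_add _ _ _ hb0, getD_map_add _ _ _ hb1]
          have hdrop : ∀ (j : Nat),
              (('"' : Char) :: (mid ++ '"' :: rest)).drop (j + (mid.length + 2)) = rest.drop j := by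
            intro j
            have : ('"' : Char) :: (mid ++ '"' :: rest) = (('"' :: mid) ++ ['"']) ++ rest := by simp
            rw [this]
            have hl : (((('"' : Char) :: mid) ++ ['"']).length) = mid.length + 2 := by simp
            rw [show j + (mid.length + 2) = ((('"' : Char) :: mid) ++ ['"']).length + j by rw [hl]; omega]
            rw [List.drop_append]
            simp
          rw [show (posQ rest).getD (2 * k) 0 + (mid.length + 2) + 1
              = ((posQ rest).getD (2 * k) 0 + 1) + (mid.length + 2) by omega]
          rw [hdrop]
          rw [show (posQ rest).getD (2 * k + 1) 0 + (mid.length + 2)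
                - ((posQ rest).getD (2 * k) 0 + 1 + (mid.length + 2))
              = (posQ rest).getD (2 * k + 1) 0 - ((posQ rest).getD (2 * k) 0 + 1) by omega]
      · -- a single unmatched quote: no pairs
        have hcnt : (('"' : Char) :: cs).count '"' = 1 := by
          simp [List.count_cons, List.count_eq_zero.2 hq]
        rw [hcnt]
        rw [segsO, if_pos rfl, segsI_no_quote cs hq]
        simp
    · -- ordinary character: everything shifts by one
      have hcnt : (c :: cs).count '"' = cs.count '"' := by simp [List.count_cons, hc]
      rw [hcnt, segsO, if_neg hc]
      rw [← ih cs.length (by simp) cs rfl]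
      apply List.map_congr_left
      intro k hk
      rw [List.mem_range] at hk
      have hlen : (posQ cs).length = cs.count '"' := posQ_length cs
      have hb0 : 2 * k < (posQ cs).length := by omega
      have hb1 : 2 * k + 1 < (posQ cs).length := by omega
      rw [sliceAt, sliceAt, posQ, if_neg hc]
      rw [getD_map_add _ _ _ hb0, getD_map_add _ _ _ hb1]
      rw [show (posQ cs).getD (2 * k) 0 + 1 + 1 = ((posQ cs).getD (2 * k) 0 + 1) + 1 by omega]
      rw [List.drop_succ_cons]
      congr 1
      omega

-- B's fold computes args ++ the segments of the automaton state
lemma foldB : ∀ (cs : List Char) (args : List String) (st : Option (List Char)),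
    (cs.foldl pvAltStep (args, st)).1
      = args ++ (match st with
                 | none => segsO cs
                 | some buf => segsI buf cs).map String.ofList := by
  intro cs
  induction cs with
  | nil => intro args st; cases st <;> simp [segsO, segsI]
  | cons c cs ih =>
    intro args st
    cases st with
    | none =>
      show (cs.foldl pvAltStep (pvAltStep (args, none) c)).1
          = args ++ (segsO (c :: cs)).map String.ofList
      by_cases hc : c = '"'
      · subst hc
        rw [segsO, if_pos rfl]
        have hs : pvAltStep (args, none) '"' = (args, some []) := by simp [pvAltStep]
        rw [hs, ih args (some [])]
      · rw [segsO, if_neg hc]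
        have hs : pvAltStep (args, none) c = (args, none) := by simp [pvAltStep, hc]
        rw [hs, ih args none]
    | some buf =>
      show (cs.foldl pvAltStep (pvAltStep (args, some buf) c)).1
          = args ++ (segsI buf (c :: cs)).map String.ofList
      by_cases hc : c = '"'
      · subst hc
        rw [segsI, if_pos rfl]
        have hs : pvAltStep (args, some buf) '"' = (args ++ [String.ofList buf], none) := by
          simp [pvAltStep]
        rw [hs, ih (args ++ [String.ofList buf]) none]
        simp
      · rw [segsI, if_neg hc]
        have hs : pvAltStep (args, some buf) c = (args, some (buf ++ [c])) := by
          simp [pvAltStep, hc]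
        rw [hs, ih args (some (buf ++ [c]))]

-- A's quote_pos_list is posQ, cast to Int
lemma qlist_eq (cmd : String) :
    (PySem.List.pyRange 0 (PySem.Str.len cmd) 1).foldl
      (fun acc c =>
        if PySem.Str.startswith (PySem.Str.slice cmd (some c) none) "\"" then acc ++ [c] else acc) []
    = (posQ cmd.toList).map (fun (k : Nat) => (k : Int)) := by
  rw [PySem.List.foldl_append_if _ (fun c => c)]
  rw [List.nil_append]
  have hlen : PySem.Str.len cmd = ((cmd.toList.length : Nat) : Int) := by
    simp [PySem.Str.len_eq]
  rw [hlen, PySem.List.pyRange_zero_natCast, List.filter_map]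
  rw [show (fun (c : Int) => c) = id from rfl, List.map_id]
  refine congrArg (List.map _) ?_
  rw [← filter_range_eq_posQ]
  apply List.filter_congr
  intro k _
  simp only [Function.comp_apply]
  rw [PySem.Str.startswith_eq, PySem.Str.toList_slice, PySem.Chars.slice_eq_listSlice,
    PySem.List.slice_from_natCast]
  rfl

lemma int_getD_posQ (cs : List Char) (n : Nat) :
    PySem.List.pyGetD ((posQ cs).map (fun (k : Nat) => (k : Int))) ((n : Nat) : Int) 0
      = (((posQ cs).getD n 0 : Nat) : Int) := by
  rw [PySem.List.pyGetD_natCast]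
  rcases lt_or_ge n (posQ cs).length with h | h
  · rw [List.getD_eq_getElem _ _ (by simpa using h), List.getD_eq_getElem _ _ h]
    simp
  · rw [List.getD_eq_default _ _ (by simpa using h), List.getD_eq_default _ _ h]
    simp

-- ===== VERDICT (by name: the statement is the Claim_ definition above) =====
theorem get_spaced_arg_split_spec : Claim_equal_get_spaced_arg_split := by
  intro cmd _
  unfold Spec_get_spaced_arg_split get_spaced_arg_split get_spaced_arg_split_alt
  rw [foldB]
  rw [qlist_eq]
  rw [PySem.List.foldl_append_singleton_eq_map]
  congr 1
  have hcount : (PySem.Str.count cmd "\"" : Int) = ((cmd.toList.count '"' : Nat) : Int) := by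
    rw [PySem.Str.count_eq]
    rw [show ("\"" : String).toList = ['"'] from rfl]
    rw [count_singleton]
  rw [hcount]
  rw [PySem.List.pyRange_of_pos _ _ (by norm_num : (0:Int) < 2)]
  have hrange : (if (1:Int) < ((cmd.toList.count '"' : Nat) : Int)
      then ((((cmd.toList.count '"' : Nat) : Int) - 1 + 2 - 1) / 2).toNat else 0)
      = cmd.toList.count '"' / 2 := by
    split_ifs with h
    · omega
    · omega
  rw [hrange, List.map_map, ← main_slices cmd.toList, List.map_map]
  apply List.map_congr_left
  intro k hk
  rw [List.mem_range] at hk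
  simp only [Function.comp]
  have hlen : (posQ cmd.toList).length = cmd.toList.count '"' := posQ_length cmd.toList
  have hb0 : 2 * k < (posQ cmd.toList).length := by omega
  have hb1 : 2 * k + 1 < (posQ cmd.toList).length := by omega
  have e0 : (1 : Int) + 2 * (k : Nat) - 1 = (((2 * k : Nat) : Nat) : Int) := by push_cast; ring
  have e1 : (1 : Int) + 2 * (k : Nat) = (((2 * k + 1 : Nat) : Nat) : Int) := by push_cast; ring
  rw [e0, e1, int_getD_posQ, int_getD_posQ]
  -- turn the string slice into the drop/take form sliceAt
  have : PySem.Str.slice cmd (some ((((posQ cmd.toList).getD (2 * k) 0 : Nat) : Int) + 1))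
      (some (((posQ cmd.toList).getD (2 * k + 1) 0 : Nat) : Int))
      = String.ofList (sliceAt cmd.toList k) := by
    rw [PySem.Str.slice]
    congr 1
    rw [PySem.Chars.slice_eq_listSlice]
    rw [show ((((posQ cmd.toList).getD (2 * k) 0 : Nat) : Int) + 1)
        = (((posQ cmd.toList).getD (2 * k) 0 + 1 : Nat) : Int) by push_cast; ring]
    rw [PySem.List.slice_natCast]
    rfl
  rw [this]
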